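-- pv_equiv track=rewrite | github.com/jahajazz/HarmonyDeepFabric | scripts/generators/harmony_qa_from_transcripts.py | _passes_questionify_gate
-- ===== SOURCE A (Python) =====
-- QUESTIONIFY_MIN_LENGTH = 8
--
-- QUESTIONIFY_MAX_LENGTH = 220
--
-- QUESTIONIFY_BLOCKED_PREFIXES = (
--     "who",
--     "what",
--     "when",
--     "where",
--     "why",
--     "how",
--     "which",
--     "do",
--     "does",
--     "did",
--     "can",
--     "will",
--     "should",
-- )
--
-- def _passes_questionify_gate(text: str) -> bool:
--     """Return True if the context should be sent to questionify."""
--     stripped = (text or "").strip()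
--     if not stripped:
--         return False
--     if "?" in stripped:
--         return False
--     length = len(stripped)
--     if length < QUESTIONIFY_MIN_LENGTH or length > QUESTIONIFY_MAX_LENGTH:
--         return False
--     normalized = stripped.lstrip(' "\'“”‘’¿¡([{-').lower()
--     for prefix in QUESTIONIFY_BLOCKED_PREFIXES:
--         if normalized.startswith(prefix + " "):
--             return False
--         if normalized == prefix:
--             return False
--     return True
-- ===== SOURCE B (Python) =====
-- QUESTIONIFY_MIN_LENGTH = 8
--
-- QUESTIONIFY_MAX_LENGTH = 220
--
-- QUESTIONIFY_BLOCKED_PREFIXES = (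
--     "who",
--     "what",
--     "when",
--     "where",
--     "why",
--     "how",
--     "which",
--     "do",
--     "does",
--     "did",
--     "can",
--     "will",
--     "should",
-- )
--
--
-- def _passes_questionify_gate(text: str) -> bool:
--     """Return True if the context should be sent to questionify."""
--     stripped = (text or "").strip()
--     if not stripped:
--         return False
--     if "?" in stripped:
--         return False
--     if not (QUESTIONIFY_MIN_LENGTH <= len(stripped) <= QUESTIONIFY_MAX_LENGTH):
--         return False
--     normalized = stripped.lstrip(' "\'“”‘’¿¡([{-').lower()
--     # Parallel multi-pattern scan: walk the text once, pruning the set of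
--     # blocked-word suffixes still compatible with what has been read; the
--     # first word is blocked iff some candidate is fully consumed when the
--     # first space (or the end of the text) is reached.
--     candidates = [word for word in QUESTIONIFY_BLOCKED_PREFIXES]
--     for ch in normalized:
--         if ch == ' ':
--             break
--         candidates = [rest[1:] for rest in candidates if rest and rest[0] == ch]
--     return not any(rest == "" for rest in candidates)
-- ===== Notes on version B (the rewrite author's own statement) =====
-- stated objective: alternative
-- what changed: A loops over the 13 blocked prefixes testing startswith(prefix+' ') and equality for each; B instead scans the normalized text once left-to-right up to the first word boundary, pruning a candidate list of blocked-word suffixes character by character (parallel multi-pattern matching), and blocks iff some candidate is fully consumed at that boundary.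
import Mathlib
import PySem

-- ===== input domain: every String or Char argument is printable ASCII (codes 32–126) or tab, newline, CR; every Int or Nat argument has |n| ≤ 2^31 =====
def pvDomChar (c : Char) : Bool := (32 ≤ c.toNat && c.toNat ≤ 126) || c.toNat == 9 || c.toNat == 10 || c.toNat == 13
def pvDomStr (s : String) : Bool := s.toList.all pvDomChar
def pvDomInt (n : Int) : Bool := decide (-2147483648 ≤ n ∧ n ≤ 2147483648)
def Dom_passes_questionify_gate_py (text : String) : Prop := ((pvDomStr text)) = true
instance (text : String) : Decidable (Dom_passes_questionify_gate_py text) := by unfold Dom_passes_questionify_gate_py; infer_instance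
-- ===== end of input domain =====

-- B replaces A's loop over the 13 blocked prefixes (startswith + equality for each) by a single
-- left-to-right scan of the normalized text that prunes a candidate list of blocked-word suffixes
-- character by character (objective: alternative).

-- ===== PORT A =====
-- the characters of the Python literal ' "\'“”‘’¿¡([{-' passed to lstrip
def qStripChars : List Char := [' ', '"', '\'', '“', '”', '‘', '’', '¿', '¡', '(', '[', '{', '-']

def qBlockedPrefixes : List (List Char) :=
  ["who".toList, "what".toList, "when".toList, "where".toList, "why".toList, "how".toList,
   "which".toList, "do".toList, "does".toList, "did".toList, "can".toList, "will".toList,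
   "should".toList]

def passes_questionify_gate_py (text : String) : Bool :=
  -- (text or "") : text if non-empty else ""
  let t : String := if text = "" then "" else text
  let stripped : List Char := (PySem.Str.strip t).toList
  if stripped = [] then false
  else if PySem.Chars.isIn "?".toList stripped then false
  else
    let length := stripped.length
    if length < 8 ∨ length > 220 then false
    else
      -- stripped.lstrip(chars): drop leading characters belonging to chars (exact; PySem has no lstrip-with-argument)
      let normalized := PySem.Chars.lower (stripped.dropWhile (fun c => qStripChars.contains c))
      -- the for-loop with early 'return False': every prefix must fail both tests
      qBlockedPrefixes.all (fun p =>
        !(PySem.Chars.startswith normalized (p ++ [' '])) && !(normalized == p))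

-- ===== PORT B =====
-- one pruning step: '[rest[1:] for rest in candidates if rest and rest[0] == ch]'
def qStep (cs : List (List Char)) (ch : Char) : List (List Char) :=
  cs.filterMap (fun rest => match rest with
    | [] => none
    | c :: tail => if c = ch then some tail else none)

-- the 'for ch in normalized: if ch == ' ': break; candidates = …' loop
def qWalk (cs : List (List Char)) : List Char → List (List Char)
  | [] => cs
  | ch :: rest => if ch = ' ' then cs else qWalk (qStep cs ch) rest

def passes_questionify_gate_py_alt (text : String) : Bool :=
  let t : String := if text = "" then "" else text
  let stripped : List Char := (PySem.Str.strip t).toList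
  if stripped = [] then false
  else if PySem.Chars.isIn "?".toList stripped then false
  else if ¬ (8 ≤ stripped.length ∧ stripped.length ≤ 220) then false
  else
    let normalized := PySem.Chars.lower (stripped.dropWhile (fun c => qStripChars.contains c))
    let final := qWalk qBlockedPrefixes normalized
    !(final.any (fun rest => rest == []))

-- ===== PRECONDITION & SPEC =====
def Spec_passes_questionify_gate_py (text : String) (out : Bool) : Prop := out = passes_questionify_gate_py_alt text
instance (text : String) (out : Bool) : Decidable (Spec_passes_questionify_gate_py text out) := by unfold Spec_passes_questionify_gate_py; infer_instance

-- ===== CLAIM (what is proved, stated in full; the proofs are below) =====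
def Claim_equal_passes_questionify_gate_py : Prop := ∀ (text : String), Dom_passes_questionify_gate_py text → Spec_passes_questionify_gate_py text (passes_questionify_gate_py text)

-- ===== LEMMAS AND PROOFS =====

-- the head of a dropWhile remainder fails the predicate
theorem qDropWhileHead {α : Type} (p : α → Bool) (l : List α) (c : α) (r : List α)
    (h : l.dropWhile p = c :: r) : p c = false := by
  induction l with
  | nil => simp at h
  | cons a t ih =>
    rw [List.dropWhile_cons] at h
    by_cases hp : p a = true
    · exact ih (by rwa [if_pos hp] at h)
    · rw [if_neg hp] at h
      injection h with h1 _
      subst h1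
      simpa using hp

-- a blocked prefix p (space-free) matches A's test (startswith 'p ' or equals p) iff p is
-- exactly the first space-delimited token of n
theorem qTok_iff (n p : List Char) (hp : ' ' ∉ p) :
    (PySem.Chars.startswith n (p ++ [' ']) = true ∨ n = p) ↔
      n.takeWhile (fun c => c != ' ') = p := by
  have hall : ∀ a ∈ p, (a != ' ') = true := by
    intro a ha; simp only [bne_iff_ne, ne_eq]; rintro rfl; exact hp ha
  constructor
  · rintro (h | rfl)
    · rw [PySem.Chars.startswith_iff] at h
      obtain ⟨r, hr⟩ := h
      subst hr
      rw [List.append_assoc, List.takeWhile_append_of_pos hall]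
      simp
    · exact List.takeWhile_eq_self_iff.mpr hall
  · intro h
    have hsplit := List.takeWhile_append_dropWhile (p := fun c => c != ' ') (l := n)
    rw [h] at hsplit
    rcases hd : n.dropWhile (fun c => c != ' ') with _ | ⟨c, r⟩
    · right; rw [← hsplit, hd, List.append_nil]
    · left
      have hc : c = ' ' := by simpa using qDropWhileHead _ n c r hd
      rw [PySem.Chars.startswith_iff]
      exact ⟨r, by rw [← hsplit, hd, hc]; simp⟩

-- one pruning step preserves the invariant: t survives to qStep cs ch iff ch::t was a candidate
theorem qStep_mem (cs : List (List Char)) (ch : Char) (t : List Char) :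
    t ∈ qStep cs ch ↔ ch :: t ∈ cs := by
  simp only [qStep, List.mem_filterMap]
  constructor
  · rintro ⟨r, hr, hf⟩
    match r with
    | [] => simp at hf
    | c :: tail =>
      by_cases hc : c = ch
      · subst hc
        simp at hf
        subst hf; exact hr
      · simp [hc] at hf
  · intro h
    exact ⟨ch :: t, h, by simp⟩

-- the scan's invariant: an empty candidate survives the walk over l iff the first
-- space-delimited token of l was a candidate
theorem qWalk_mem (l : List Char) : ∀ (cs : List (List Char)),
    ([] ∈ qWalk cs l ↔ l.takeWhile (fun c => c != ' ') ∈ cs) := by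
  induction l with
  | nil => intro cs; simp [qWalk]
  | cons ch rest ih =>
    intro cs
    by_cases hch : ch = ' '
    · subst hch; simp [qWalk]
    · rw [qWalk, if_neg hch, ih (qStep cs ch), qStep_mem,
        List.takeWhile_cons, if_pos (by simpa using hch)]

-- core equivalence: A's loop over the 13 prefixes equals B's candidate-pruning scan
theorem qMain (n : List Char) :
    qBlockedPrefixes.all (fun p =>
        !(PySem.Chars.startswith n (p ++ [' '])) && !(n == p)) =
      !((qWalk qBlockedPrefixes n).any (fun rest => rest == [])) := by
  have hsp : ∀ p ∈ qBlockedPrefixes, ' ' ∉ p := by decide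
  rw [Bool.eq_iff_iff]
  simp only [List.all_eq_true, Bool.and_eq_true, Bool.not_eq_true', beq_eq_false_iff_ne,
    ne_eq, List.any_eq_false, beq_iff_eq]
  constructor
  · intro h r hr hre
    subst hre
    have hmem := (qWalk_mem n qBlockedPrefixes).mp hr
    obtain ⟨h1, h2⟩ := h _ hmem
    rcases (qTok_iff n _ (hsp _ hmem)).mpr rfl with h' | h'
    · exact absurd h' (by simp [h1])
    · exact h2 h'
  · intro h p hmem
    have hno : n.takeWhile (fun c => c != ' ') ∉ qBlockedPrefixes := by
      intro hc
      exact h [] ((qWalk_mem n qBlockedPrefixes).mpr hc) rfl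
    refine ⟨?_, ?_⟩
    · by_contra hsw
      simp only [Bool.not_eq_false] at hsw
      exact hno (((qTok_iff n p (hsp p hmem)).mp (Or.inl hsw)) ▸ hmem)
    · intro he
      exact hno (((qTok_iff n p (hsp p hmem)).mp (Or.inr he)) ▸ hmem)

set_option maxHeartbeats 1000000 in
theorem passes_questionify_gate_py_eq (text : String) :
    passes_questionify_gate_py text = passes_questionify_gate_py_alt text := by
  by_cases h1 : (PySem.Chars.strip ((if text = "" then "" else text) : String).toList) = []
  · simp [passes_questionify_gate_py, passes_questionify_gate_py_alt, h1]
  · by_cases h2 : PySem.Chars.isIn ['?'] (PySem.Chars.strip ((if text = "" then "" else text) : String).toList) = true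
    · simp [passes_questionify_gate_py, passes_questionify_gate_py_alt, h1, h2]
    · by_cases h3 : 8 ≤ (PySem.Chars.strip ((if text = "" then "" else text) : String).toList).length ∧ (PySem.Chars.strip ((if text = "" then "" else text) : String).toList).length ≤ 220
      · have e1 : ¬ ((PySem.Chars.strip ((if text = "" then "" else text) : String).toList).length < 8) := by omega
        have e2 : ¬ (220 < (PySem.Chars.strip ((if text = "" then "" else text) : String).toList).length) := by omega
        simp [passes_questionify_gate_py, passes_questionify_gate_py_alt, h1, h2, e1, e2, h3.1,
          qMain]
      · rcases (by omega : (PySem.Chars.strip ((if text = "" then "" else text) : String).toList).length < 8 ∨ 220 < (PySem.Chars.strip ((if text = "" then "" else text) : String).toList).length) with hlt | hgt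
        · have e3 : ¬ (8 ≤ (PySem.Chars.strip ((if text = "" then "" else text) : String).toList).length) := by omega
          simp [passes_questionify_gate_py, passes_questionify_gate_py_alt, h1, h2, hlt, e3]
        · simp [passes_questionify_gate_py, passes_questionify_gate_py_alt, h1, h2, hgt]

-- ===== VERDICT (by name: the statement is the Claim_ definition above) =====
theorem passes_questionify_gate_py_spec : Claim_equal_passes_questionify_gate_py := by
  intro text _
  unfold Spec_passes_questionify_gate_py
  exact passes_questionify_gate_py_eq text
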